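-- pv_equiv track=rewrite | github.com/alexregii/Proyecto-Modelizacion-algoritmos-evolutivos-SALBP | algo_propre.py | tiempo_grupo
-- ===== SOURCE A (Python) =====
-- from collections import defaultdict
--
-- def tiempo_grupo(sec, tiempos):
--     suma = defaultdict(int)
--     for i in range(len(sec)):
--         suma[sec[i]] += tiempos[i]
--     if not sec:
--         return []
--     max_val = max(sec)
--     return [suma.get(i, 0) for i in range(max_val + 1)]
-- ===== SOURCE B (Python) =====
-- def tiempo_grupo(sec, tiempos):
--     if not sec:
--         return []
--     pares = list(zip(sec, tiempos))
--     return [sum(t for s, t in pares if s == i) for i in range(max(sec) + 1)]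
-- ===== Notes on version B (the rewrite author's own statement) =====
-- stated objective: simpler
-- what changed: Drops the mutable defaultdict accumulator entirely: B zips the inputs once and builds the result by a per-station scan, one comprehension summing the matching times for each index 0..max(sec); negative stations fall away naturally instead of being dropped during densification.
import Mathlib
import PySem

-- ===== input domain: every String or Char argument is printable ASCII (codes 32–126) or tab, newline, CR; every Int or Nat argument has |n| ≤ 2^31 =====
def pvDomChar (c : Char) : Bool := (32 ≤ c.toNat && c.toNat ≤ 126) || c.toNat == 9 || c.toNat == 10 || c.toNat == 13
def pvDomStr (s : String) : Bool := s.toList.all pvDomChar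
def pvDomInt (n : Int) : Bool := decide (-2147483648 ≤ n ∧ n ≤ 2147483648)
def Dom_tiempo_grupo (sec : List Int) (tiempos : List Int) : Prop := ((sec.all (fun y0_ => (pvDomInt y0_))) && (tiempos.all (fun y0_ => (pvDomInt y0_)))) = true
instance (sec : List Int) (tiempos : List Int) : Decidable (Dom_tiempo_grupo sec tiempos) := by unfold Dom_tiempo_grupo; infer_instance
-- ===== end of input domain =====

-- B drops the mutable defaultdict accumulator: it zips once and computes each output
-- cell by a direct per-station sum over the pairs (simpler; no accumulation state).

-- ===== PORT A =====
def tiempo_grupo (sec : List Int) (tiempos : List Int) : List Int :=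
  -- suma = defaultdict(int); for i in range(len(sec)): suma[sec[i]] += tiempos[i]
  -- (pyGetD with default 0: under Pre_ every index is in range, where Python indexing is exact)
  let suma : PySem.Dict Int Int :=
    (PySem.List.pyRange 0 (sec.length : Int) 1).foldl
      (fun d i => d.modify (PySem.List.pyGetD sec i 0) 0 (· + PySem.List.pyGetD tiempos i 0))
      PySem.Dict.empty
  if sec = [] then []
  else
    match PySem.List.max? sec (fun x => x) with
    | none => []   -- unreachable: sec ≠ []
    | some max_val => (PySem.List.pyRange 0 (max_val + 1) 1).map (fun i => suma.getD i 0)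

-- ===== PORT B =====
def tiempo_grupo_alt (sec : List Int) (tiempos : List Int) : List Int :=
  if sec = [] then []
  else
    let pares := sec.zip tiempos
    let m := (PySem.List.max? sec (fun x => x)).getD 0
    (PySem.List.pyRange 0 (m + 1) 1).map
      (fun i => ((pares.filter (fun p => p.1 == i)).map (fun p => p.2)).sum)

-- ===== PRECONDITION & SPEC =====
-- Pre_ excludes exactly the inputs where A raises IndexError (tiempos shorter than sec).
def Pre_tiempo_grupo (sec : List Int) (tiempos : List Int) : Prop := sec.length ≤ tiempos.length
instance (sec : List Int) (tiempos : List Int) : Decidable (Pre_tiempo_grupo sec tiempos) := by unfold Pre_tiempo_grupo; infer_instance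
def pvWitness_tiempo_grupo : List Int × List Int := ([0, 2, 0, -1], [3, 4, 5, 6])

def Spec_tiempo_grupo (sec : List Int) (tiempos : List Int) (out : List Int) : Prop := out = tiempo_grupo_alt sec tiempos
instance (sec : List Int) (tiempos : List Int) (out : List Int) : Decidable (Spec_tiempo_grupo sec tiempos out) := by unfold Spec_tiempo_grupo; infer_instance

-- ===== CLAIM (what is proved, stated in full; the proofs are below) =====
def Claim_equal_tiempo_grupo : Prop := ∀ (sec : List Int) (tiempos : List Int), Dom_tiempo_grupo sec tiempos → Pre_tiempo_grupo sec tiempos → Spec_tiempo_grupo sec tiempos (tiempo_grupo sec tiempos)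

-- ===== LEMMAS AND PROOFS =====

-- the per-key total: what A accumulates and what B sums directly
def pvKeySum (l : List (Int × Int)) (k : Int) : Int :=
  (l.map (fun p => if p.1 = k then p.2 else 0)).sum

-- A's index loop over range(len(sec)) is the fold over zip(sec, tiempos)
theorem pvA_fold_zip (sec tiempos : List Int) (h : sec.length ≤ tiempos.length) :
    (PySem.List.pyRange 0 (sec.length : Int) 1).foldl
      (fun d i => d.modify (PySem.List.pyGetD sec i 0) 0 (· + PySem.List.pyGetD tiempos i 0))
      PySem.Dict.empty
    = (sec.zip tiempos).foldl (fun d p => d.modify p.1 0 (· + p.2)) PySem.Dict.empty := by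
  have hz : ((sec.zip tiempos).length : Int) = (sec.length : Int) := by
    simp [List.length_zip]; omega
  rw [← hz]
  rw [PySem.List.foldl_congr_mem (g := fun d i =>
        d.modify (PySem.List.pyGetD (sec.zip tiempos) i (0, 0)).1 0
          (· + (PySem.List.pyGetD (sec.zip tiempos) i (0, 0)).2))]
  · exact PySem.List.foldl_pyRange_zero_pyGetD' (sec.zip tiempos) (0, 0)
      (fun d p => d.modify p.1 0 (· + p.2)) PySem.Dict.empty
  · intro acc x hx
    rw [PySem.List.mem_pyRange_one] at hx
    have hx1 : 0 ≤ x := hx.1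
    have hxs : x < (sec.length : Int) := hz ▸ hx.2
    rw [PySem.List.pyGetD_eq_getElem sec _ hx1 hxs,
        PySem.List.pyGetD_eq_getElem tiempos _ hx1 (lt_of_lt_of_le hxs (by exact_mod_cast h)),
        PySem.List.pyGetD_eq_getElem (sec.zip tiempos) _ hx1 (by simpa [List.length_zip] using hx.2)]
    simp [List.getElem_zip]

-- looking up the dict built by the group-by loop
theorem pvDict_getD (l : List (Int × Int)) (d : PySem.Dict Int Int) (k : Int) :
    (l.foldl (fun d p => d.modify p.1 0 (· + p.2)) d).getD k 0 = d.getD k 0 + pvKeySum l k := by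
  induction l generalizing d with
  | nil => simp [pvKeySum]
  | cons p t ih =>
      rw [List.foldl_cons, ih, PySem.Dict.getD_modify]
      unfold pvKeySum
      simp only [List.map_cons, List.sum_cons]
      by_cases h : k = p.1
      · subst h; rw [if_pos rfl, if_pos rfl]; ring
      · rw [if_neg h, if_neg (fun hh => h hh.symm)]; ring

-- B's per-station filter-and-sum computes the same per-key total
theorem pvFilterSum (l : List (Int × Int)) (k : Int) :
    ((l.filter (fun p => p.1 == k)).map (fun p => p.2)).sum = pvKeySum l k := by
  induction l with
  | nil => simp [pvKeySum]
  | cons p t ih =>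
      unfold pvKeySum
      unfold pvKeySum at ih
      by_cases h : p.1 = k <;> simp [h, ih]

-- ===== VERDICT (by name: the statement is the Claim_ definition above) =====
theorem tiempo_grupo_spec : Claim_equal_tiempo_grupo := by
  intro sec tiempos _ hpre
  unfold Spec_tiempo_grupo tiempo_grupo tiempo_grupo_alt
  by_cases hs : sec = []
  · simp [hs]
  · obtain ⟨m, hm⟩ : ∃ m, PySem.List.max? sec (fun x => x) = some m := by
      cases hmax : PySem.List.max? sec (fun x => x) with
      | none => exact absurd ((PySem.List.max?_eq_none_iff sec (fun x => x)).mp hmax) hs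
      | some m => exact ⟨m, rfl⟩
    simp only [if_neg hs, hm, Option.getD_some]
    rw [pvA_fold_zip sec tiempos hpre]
    apply List.map_congr_left
    intro i _
    rw [pvDict_getD, pvFilterSum]
    simp [PySem.Dict.getD_empty]
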